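-- pv_equiv track=rewrite | github.com/Elevenv/Placement-Stuff | aakashAndDinner.py | dinner
-- ===== SOURCE A (Python) =====
-- def dinner(n,k,l,l1):
--
--     lct = len(set(l))
--     if lct<k:
--         return -1
--
--     d = {}
--
--     for j in range(n):
--         if l[j] not in d:
--             d[l[j]] = l1[j]
--         elif d[l[j]]>l1[j]:
--             d[l[j]] = l1[j]
--
--     ans = list(d.values())
--     ans.sort()
--
--     return sum(ans[:k])
-- ===== SOURCE B (Python) =====
-- def dinner(n, k, l, l1):
--     if len(set(l)) < k:
--         return -1
--     mins = []
--     run = None  # (current key, minimum value seen for it)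
--     for key, val in sorted(zip(l[:n], l1[:n]), key=lambda p: p[0]):
--         if run is not None and run[0] == key:
--             run = (key, min(run[1], val))
--         else:
--             if run is not None:
--                 mins.append(run[1])
--             run = (key, val)
--     if run is not None:
--         mins.append(run[1])
--     mins.sort()
--     return sum(mins[:k])
-- ===== Notes on version B (the rewrite author's own statement) =====
-- stated objective: alternative
-- what changed: Replaces A's single-pass mutable dict of running per-key minima with sort-then-scan grouping: sort the zipped pairs by key, scan once collecting each contiguous run's minimum value, then sort those minima; Pre_ excludes negative n with -len(l) < n and k != 0 (a negative pair count is outside the natural domain and no behaviour is specified there: A's range(n) loop runs zero times and returns 0, B's slice l[:n] keeps a prefix, both defensible readings) and n exceeding either list's length, where A raises IndexError.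
-- outside the precondition, e.g. on dinner(-1, 1, [1, 2], [5, 6]): A returns 0, B returns 5
import Mathlib
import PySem

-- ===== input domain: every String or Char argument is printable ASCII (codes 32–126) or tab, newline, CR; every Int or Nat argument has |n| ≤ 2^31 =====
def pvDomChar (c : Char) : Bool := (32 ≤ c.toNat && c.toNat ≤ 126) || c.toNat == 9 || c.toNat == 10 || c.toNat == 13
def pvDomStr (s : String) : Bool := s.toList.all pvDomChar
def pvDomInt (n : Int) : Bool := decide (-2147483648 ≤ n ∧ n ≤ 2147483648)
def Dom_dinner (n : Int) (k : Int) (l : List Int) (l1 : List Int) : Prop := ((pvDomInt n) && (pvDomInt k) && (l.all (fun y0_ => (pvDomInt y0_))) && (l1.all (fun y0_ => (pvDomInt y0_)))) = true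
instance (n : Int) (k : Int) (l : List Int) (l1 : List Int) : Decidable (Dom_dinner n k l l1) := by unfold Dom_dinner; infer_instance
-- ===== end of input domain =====

-- B replaces A's single-pass dict of running per-key minima by sort-then-scan grouping of the
-- zipped pairs: sort by key, collect each contiguous run's minimum (objective: alternative algorithm).

-- ===== PORT A =====
def dinner (n : Int) (k : Int) (l : List Int) (l1 : List Int) : Int :=
  let lct : Int := (PySem.Set.ofList l).length
  if lct < k then -1
  else
    let d := (PySem.List.pyRange 0 n 1).foldl (fun (d : PySem.Dict Int Int) j =>
      if !(d.contains (PySem.List.pyGetD l j 0)) then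
        d.insert (PySem.List.pyGetD l j 0) (PySem.List.pyGetD l1 j 0)
      else if d.getD (PySem.List.pyGetD l j 0) 0 > PySem.List.pyGetD l1 j 0 then
        d.insert (PySem.List.pyGetD l j 0) (PySem.List.pyGetD l1 j 0)
      else d) PySem.Dict.empty
    let ans := PySem.List.sorted d.values (fun x => x) false
    (PySem.List.slice ans none (some k)).sum

-- ===== PORT B =====
-- B's loop body: fold state = (mins, run) with run = None | (current key, minimum value seen for it)
def stepB (st : List Int × Option (Int × Int)) (p : Int × Int) : List Int × Option (Int × Int) :=
  match st.2 with
  | some r =>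
    if r.1 == p.1 then (st.1, some (p.1, min r.2 p.2))
    else (st.1 ++ [r.2], some (p.1, p.2))
  | none => (st.1, some (p.1, p.2))

-- the final 'if run is not None: mins.append(run[1])'
def finishB (st : List Int × Option (Int × Int)) : List Int :=
  match st.2 with
  | some r => st.1 ++ [r.2]
  | none => st.1

def dinner_alt (n : Int) (k : Int) (l : List Int) (l1 : List Int) : Int :=
  if ((PySem.Set.ofList l).length : Int) < k then -1
  else
    -- for key, val in sorted(zip(l[:n], l1[:n]), key=lambda p: p[0]):
    let sp := PySem.List.sorted
      ((PySem.List.slice l none (some n)).zip (PySem.List.slice l1 none (some n)))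
      (fun p => p.1) false
    let mins := finishB (sp.foldl stepB ([], none))
    let minsS := PySem.List.sorted mins (fun x => x) false
    (PySem.List.slice minsS none (some k)).sum

-- ===== PRECONDITION & SPEC =====
-- Pre_ excludes (beyond the early -1, k = 0 and n ≤ -len(l) cases, where the two sides provably
-- agree) negative n with -len(l) < n — a negative pair count is outside the natural domain and no
-- behaviour is specified there: A's range(n) loop runs zero times (returning 0) while B's slice
-- l[:n] keeps a prefix, both defensible readings — and n exceeding either list's length, where A
-- raises IndexError.
def Pre_dinner (n : Int) (k : Int) (l : List Int) (l1 : List Int) : Prop :=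
  ((PySem.Set.ofList l).length : Int) < k ∨
    (n ≤ l.length ∧ n ≤ l1.length ∧ (0 ≤ n ∨ k = 0)) ∨
    n + l.length ≤ 0
instance (n : Int) (k : Int) (l : List Int) (l1 : List Int) : Decidable (Pre_dinner n k l l1) := by unfold Pre_dinner; infer_instance
def pvWitness_dinner : Int × Int × List Int × List Int := (3, 2, [1, 2, 1], [5, 3, 4])

def Spec_dinner (n : Int) (k : Int) (l : List Int) (l1 : List Int) (out : Int) : Prop := out = dinner_alt n k l l1
instance (n : Int) (k : Int) (l : List Int) (l1 : List Int) (out : Int) : Decidable (Spec_dinner n k l l1 out) := by unfold Spec_dinner; infer_instance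

-- ===== CLAIM (what is proved, stated in full; the proofs are below) =====
def Claim_equal_dinner : Prop := ∀ (n : Int) (k : Int) (l : List Int) (l1 : List Int), Dom_dinner n k l l1 → Pre_dinner n k l l1 → Spec_dinner n k l l1 (dinner n k l l1)

-- ===== LEMMAS AND PROOFS =====

-- A's loop body, on an already-fetched (key, value) pair
def stepD (d : PySem.Dict Int Int) (p : Int × Int) : PySem.Dict Int Int :=
  if !(d.contains p.1) then d.insert p.1 p.2
  else if d.getD p.1 0 > p.2 then d.insert p.1 p.2
  else d

-- the running-minimum accumulator seen through get?
def gmin (o : Option Int) (v : Int) : Option Int :=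
  some (match o with | none => v | some w => min w v)

theorem foldA_eq (l l1 : List Int) (N : Nat) (hN1 : N ≤ l.length) (hN2 : N ≤ l1.length)
    (d : PySem.Dict Int Int) :
    (PySem.List.pyRange 0 (N : Int) 1).foldl (fun (d : PySem.Dict Int Int) j =>
      if !(d.contains (PySem.List.pyGetD l j 0)) then
        d.insert (PySem.List.pyGetD l j 0) (PySem.List.pyGetD l1 j 0)
      else if d.getD (PySem.List.pyGetD l j 0) 0 > PySem.List.pyGetD l1 j 0 then
        d.insert (PySem.List.pyGetD l j 0) (PySem.List.pyGetD l1 j 0)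
      else d) d
    = ((l.take N).zip (l1.take N)).foldl stepD d := by
  induction N with
  | zero => simp [PySem.List.pyRange_one_eq_nil (le_refl (0 : Int))]
  | succ N ih =>
    have hlt1 : N < l.length := by omega
    have hlt2 : N < l1.length := by omega
    have hcast : ((N + 1 : Nat) : Int) = (N : Int) + 1 := by push_cast; ring
    rw [hcast, PySem.List.pyRange_one_succ_right (by exact_mod_cast Nat.zero_le N),
        List.foldl_append, ih (by omega) (by omega)]
    have ht1 : l.take (N + 1) = l.take N ++ [l[N]] := by
      rw [List.take_add_one, List.getElem?_eq_getElem hlt1]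
      rfl
    have ht2 : l1.take (N + 1) = l1.take N ++ [l1[N]] := by
      rw [List.take_add_one, List.getElem?_eq_getElem hlt2]
      rfl
    rw [ht1, ht2, List.zip_append (by simp; omega), List.foldl_append]
    have hg1 : PySem.List.pyGetD l (N : Int) 0 = l[N] := by
      rw [PySem.List.pyGetD_natCast, List.getD_eq_getElem l 0 hlt1]
    have hg2 : PySem.List.pyGetD l1 (N : Int) 0 = l1[N] := by
      rw [PySem.List.pyGetD_natCast, List.getD_eq_getElem l1 0 hlt2]
    simp [stepD, hg1, hg2]

theorem keys_foldl_stepD (ps : List (Int × Int)) (d : PySem.Dict Int Int) :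
    (ps.foldl stepD d).keys = PySem.Set.update d.keys (ps.map (fun p => p.1)) := by
  induction ps generalizing d with
  | nil => simp [PySem.Set.update_nil]
  | cons p ps ih =>
    rw [List.foldl_cons, ih, List.map_cons, PySem.Set.update_cons]
    have hstep : (stepD d p).keys = PySem.Set.add d.keys p.1 := by
      unfold stepD
      by_cases hb : d.contains p.1 = true
      · have hmem : p.1 ∈ d.keys := by
          by_contra hm
          have h0 : d.get? p.1 = none := by
            rw [PySem.Dict.get?_eq_none_iff_not_mem_keys]
            exact hm
          rw [PySem.Dict.get?_eq_none_iff_contains, hb] at h0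
          simp at h0
        rw [if_neg (by simp [hb]), PySem.Set.add_of_mem hmem]
        by_cases hlt : d.getD p.1 0 > p.2
        · rw [if_pos hlt, PySem.Dict.keys_insert_of_contains _ _ hb]
        · rw [if_neg hlt]
      · have hb' : d.contains p.1 = false := by simpa using hb
        have h0 : d.get? p.1 = none := by
          rw [PySem.Dict.get?_eq_none_iff_contains, hb']
        have hmem : p.1 ∉ d.keys := by
          rw [← PySem.Dict.get?_eq_none_iff_not_mem_keys]
          exact h0
        rw [if_pos (by simp [hb']), PySem.Dict.keys_insert_of_not_contains _ _ hb',
            PySem.Set.add_of_not_mem hmem]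
    rw [hstep]

theorem get?_foldl_stepD (ps : List (Int × Int)) (d : PySem.Dict Int Int) (c : Int) :
    (ps.foldl stepD d).get? c
      = ((ps.filter (fun p => p.1 == c)).map (fun p => p.2)).foldl gmin (d.get? c) := by
  induction ps generalizing d with
  | nil => simp
  | cons p ps ih =>
    rw [List.foldl_cons, ih]
    by_cases hpc : p.1 = c
    · have hstep : (stepD d p).get? c = gmin (d.get? c) p.2 := by
        subst hpc
        by_cases hb : d.contains p.1 = true
        · have hne : ¬ d.get? p.1 = none := by
            rw [PySem.Dict.get?_eq_none_iff_contains, hb]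
            simp
          obtain ⟨w, hw⟩ := Option.ne_none_iff_exists'.mp hne
          have hgd : d.getD p.1 0 = w := PySem.Dict.getD_of_get?_eq_some d 0 hw
          by_cases hlt : d.getD p.1 0 > p.2
          · have hst : stepD d p = d.insert p.1 p.2 := by
              unfold stepD
              rw [if_neg (by simp [hb]), if_pos hlt]
            rw [hst, PySem.Dict.get?_insert_self, hw]
            unfold gmin
            have hm : min w p.2 = p.2 := min_eq_right (by omega)
            simp [hm]
          · have hst : stepD d p = d := by
              unfold stepD
              rw [if_neg (by simp [hb]), if_neg hlt]
            rw [hst, hw]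
            unfold gmin
            have hm : min w p.2 = w := min_eq_left (by omega)
            simp [hm]
        · have hb' : d.contains p.1 = false := by simpa using hb
          have hnone : d.get? p.1 = none := by
            rw [PySem.Dict.get?_eq_none_iff_contains, hb']
          have hst : stepD d p = d.insert p.1 p.2 := by
            unfold stepD
            rw [if_pos (by simp [hb'])]
          rw [hst, PySem.Dict.get?_insert_self, hnone]
          rfl
      simp [hpc, hstep]
    · have hne : c ≠ p.1 := Ne.symm hpc
      have hstep : (stepD d p).get? c = d.get? c := by
        unfold stepD
        split_ifs <;> simp [PySem.Dict.get?_insert_of_ne _ _ hne]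
      simp [hpc, hstep]

theorem foldl_gmin_some (t : List Int) (w : Int) :
    t.foldl gmin (some w) = some (t.foldl min w) := by
  induction t generalizing w with
  | nil => rfl
  | cons v t ih => simp [List.foldl_cons, gmin, ih]

theorem getD_foldl_stepD (ps : List (Int × Int)) (c : Int) (hc : c ∈ ps.map (fun p => p.1)) :
    (ps.foldl stepD PySem.Dict.empty).getD c 0
      = (PySem.List.min? ((ps.filter (fun p => p.1 == c)).map (fun p => p.2)) (fun v => v)).getD 0 := by
  obtain ⟨p, hp, hpc⟩ := List.mem_map.mp hc
  have hpf : p ∈ ps.filter (fun p => p.1 == c) := List.mem_filter.mpr ⟨hp, by simp [hpc]⟩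
  have hne : (ps.filter (fun p => p.1 == c)).map (fun p => p.2) ≠ [] := by
    simp only [ne_eq, List.map_eq_nil_iff]
    intro h0
    rw [h0] at hpf
    simp at hpf
  obtain ⟨v, t, hvt⟩ := List.exists_cons_of_ne_nil hne
  rw [PySem.Dict.getD_eq_get?_getD, get?_foldl_stepD, PySem.Dict.get?_empty, hvt,
      PySem.List.min?_id_cons, List.foldl_cons]
  have h0 : gmin none v = some v := rfl
  rw [h0, foldl_gmin_some]


-- ---- B-side machinery: the run scan over the key-sorted pairs ----

-- the scan with an open run (c, m), written as direct recursion
def goRuns (c m : Int) : List (Int × Int) → List Int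
  | [] => [m]
  | p :: t => if p.1 = c then goRuns c (min m p.2) t else m :: goRuns p.1 p.2 t

-- first-occurrence dedup in a recursion-friendly form
def odedup : List Int → List Int
  | [] => []
  | x :: xs => x :: odedup (xs.filter (fun y => y ≠ x))
termination_by xs => xs.length
decreasing_by simp only [List.length_unattach]; exact Nat.lt_succ_of_le (le_trans (List.length_filter_le _ _) (by simp))

-- the per-key minimum value (0 only for an absent key, never hit below)
def minGroup (ps : List (Int × Int)) (c : Int) : Int :=
  (PySem.List.min? ((ps.filter (fun p => p.1 == c)).map (fun p => p.2)) (fun v => v)).getD 0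

theorem mem_odedup_aux (x : Int) (n : Nat) : ∀ xs : List Int, xs.length ≤ n → (x ∈ odedup xs ↔ x ∈ xs) := by
  induction n with
  | zero =>
    intro xs hxs
    rw [List.length_eq_zero_iff.mp (Nat.le_zero.mp hxs)]
    rw [odedup]
  | succ n ih =>
    intro xs hxs
    match xs with
    | [] => rw [odedup]
    | y :: ys =>
      rw [odedup]
      have hlen : (ys.filter (fun z => z ≠ y)).length ≤ n :=
        le_trans (List.length_filter_le _ _) (by simpa using hxs)
      simp only [List.mem_cons, ih _ hlen, List.mem_filter]
      by_cases hxy : x = y <;> simp [hxy]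

theorem mem_odedup (x : Int) (xs : List Int) : x ∈ odedup xs ↔ x ∈ xs :=
  mem_odedup_aux x xs.length xs le_rfl

theorem nodup_odedup_aux (n : Nat) : ∀ xs : List Int, xs.length ≤ n → (odedup xs).Nodup := by
  induction n with
  | zero =>
    intro xs hxs
    rw [List.length_eq_zero_iff.mp (Nat.le_zero.mp hxs), odedup]
    exact List.nodup_nil
  | succ n ih =>
    intro xs hxs
    match xs with
    | [] => rw [odedup]; exact List.nodup_nil
    | y :: ys =>
      rw [odedup]
      have hlen : (ys.filter (fun z => z ≠ y)).length ≤ n :=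
        le_trans (List.length_filter_le _ _) (by simpa using hxs)
      refine List.nodup_cons.mpr ⟨fun hy => ?_, ih _ hlen⟩
      rw [mem_odedup] at hy
      simp at hy

theorem nodup_odedup (xs : List Int) : (odedup xs).Nodup :=
  nodup_odedup_aux xs.length xs le_rfl

theorem foldB_go (qs : List (Int × Int)) (acc : List Int) (c m : Int) :
    finishB (qs.foldl stepB (acc, some (c, m))) = acc ++ goRuns c m qs := by
  induction qs generalizing acc c m with
  | nil => simp [finishB, goRuns]
  | cons p t ih =>
    rw [List.foldl_cons]
    by_cases h : p.1 = c
    · have hstep : stepB (acc, some (c, m)) p = (acc, some (p.1, min m p.2)) := by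
        simp [stepB, h]
      rw [hstep, ih, goRuns, if_pos h, h]
    · have hstep : stepB (acc, some (c, m)) p = (acc ++ [m], some (p.1, p.2)) := by
        simp [stepB, Ne.symm h]
      rw [hstep, ih, goRuns, if_neg h, List.append_assoc]
      rfl

theorem go_spec (t : List (Int × Int)) (c m : Int)
    (hp : t.Pairwise (fun a b => a.1 ≤ b.1)) (hc : ∀ q ∈ t, c ≤ q.1) :
    goRuns c m t
      = (odedup (c :: t.map (fun p => p.1))).map (minGroup ((c, m) :: t)) := by
  induction t generalizing c m with
  | nil =>
    rw [goRuns, odedup]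
    simp [odedup, minGroup, PySem.List.min?_id_cons]
  | cons p t ih =>
    obtain ⟨c', v⟩ := p
    obtain ⟨hcv, hpt⟩ := List.pairwise_cons.mp hp
    by_cases hd : c' = c
    · subst hd
      rw [goRuns, if_pos rfl, ih c' (min m v) hpt hcv]
      -- dedup drops the duplicated head key
      have hdd : odedup (c' :: c' :: t.map (fun p => p.1))
          = odedup (c' :: t.map (fun p => p.1)) := by
        rw [odedup, odedup]
        simp
      simp only [List.map_cons]
      rw [hdd]
      refine (List.map_congr_left fun d hdm => ?_).symm
      by_cases hdc : d = c'
      · subst hdc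
        simp [minGroup, PySem.List.min?_id_cons, List.foldl_cons]
      · have hne : (c' == d) = false := by simp [Ne.symm hdc]
        simp [minGroup, hne]
    · have hlt : c < c' := lt_of_le_of_ne (hc _ (List.mem_cons_self)) (Ne.symm hd)
      rw [goRuns, if_neg hd, ih c' v hpt hcv]
      -- the head key c occurs nowhere later, so dedup keeps it and the groups of later keys ignore it
      have hkeys : ∀ d ∈ c' :: t.map (fun p => p.1), c < d := by
        intro d hdm
        rcases List.mem_cons.mp hdm with h | h
        · omega
        · obtain ⟨q, hq, hq1⟩ := List.mem_map.mp h
          have := hcv q hq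
          omega
      have hfilt : (c' :: t.map (fun p => p.1)).filter (fun y => y ≠ c)
          = c' :: t.map (fun p => p.1) := by
        apply List.filter_eq_self.mpr
        intro d hdm
        have := hkeys d hdm
        simp
        omega
      have hdd : odedup (c :: c' :: t.map (fun p => p.1))
          = c :: odedup (c' :: t.map (fun p => p.1)) := by
        rw [odedup]
        rw [show ((c' :: t.map (fun p => p.1)).filter (fun y => y ≠ c)) = c' :: t.map (fun p => p.1) from hfilt]
      simp only [List.map_cons]
      rw [hdd, List.map_cons]
      -- head: the only pair with key c is (c, m)
      have hhead : minGroup ((c, m) :: (c', v) :: t) c = m := by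
        have h1 : ((c', v) :: t).filter (fun p => p.1 == c) = [] := by
          apply List.filter_eq_nil_iff.mpr
          intro q hq
          have : c < q.1 := by
            rcases List.mem_cons.mp hq with h | h
            · rw [h]; exact hlt
            · have := hcv q h; omega
          simp
          omega
        simp [minGroup, h1, PySem.List.min?_id_cons]
      rw [hhead]
      congr 1
      refine (List.map_congr_left fun d hdm => ?_).symm
      have hdgt : c < d := hkeys d ((mem_odedup d _).mp hdm)
      have hne : (c == d) = false := by simp; omega
      simp [minGroup, hne]

theorem scan_eq (qs : List (Int × Int)) (hp : qs.Pairwise (fun a b => a.1 ≤ b.1)) :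
    finishB (qs.foldl stepB ([], none)) = (odedup (qs.map (fun p => p.1))).map (minGroup qs) := by
  match qs with
  | [] => simp [finishB, odedup]
  | p :: t =>
    obtain ⟨hc, hpt⟩ := List.pairwise_cons.mp hp
    rw [List.foldl_cons]
    have hstep : stepB ([], none) p = ([], some (p.1, p.2)) := rfl
    rw [hstep, foldB_go, List.nil_append, go_spec t p.1 p.2 hpt hc, List.map_cons]

theorem min?_id_perm (l₁ l₂ : List Int) (h : l₁.Perm l₂) :
    PySem.List.min? l₁ (fun v => v) = PySem.List.min? l₂ (fun v => v) := by
  by_cases hnil : l₁ = []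
  · subst hnil
    rw [List.nil_perm] at h
    rw [h]
  · have hnil₂ : l₂ ≠ [] := fun h2 => hnil (by simpa [h2, List.perm_nil] using h)
    obtain ⟨m₁, hm₁⟩ := Option.ne_none_iff_exists'.mp
      (fun h0 : PySem.List.min? l₁ (fun v => v) = none =>
        hnil ((PySem.List.min?_eq_none_iff l₁ (fun v => v)).mp h0))
    obtain ⟨m₂, hm₂⟩ := Option.ne_none_iff_exists'.mp
      (fun h0 : PySem.List.min? l₂ (fun v => v) = none =>
        hnil₂ ((PySem.List.min?_eq_none_iff l₂ (fun v => v)).mp h0))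
    rw [hm₁, hm₂]
    have h12 : m₁ ≤ m₂ :=
      PySem.List.min?_isMin hm₁ m₂ (h.symm.subset (PySem.List.min?_mem hm₂))
    have h21 : m₂ ≤ m₁ :=
      PySem.List.min?_isMin hm₂ m₁ (h.subset (PySem.List.min?_mem hm₁))
    rw [le_antisymm h12 h21]

theorem minGroup_perm (ps qs : List (Int × Int)) (h : ps.Perm qs) (c : Int) :
    minGroup ps c = minGroup qs c := by
  unfold minGroup
  rw [min?_id_perm _ _ ((h.filter _).map _)]

theorem slice_neg_big (l : List Int) (n : Int) (h : n + l.length ≤ 0) :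
    PySem.List.slice l none (some n) = [] := by
  simp [PySem.List.slice]
  left
  simp only [PySem.List.clampIdx]
  split_ifs <;> omega

theorem dinner_eq (n : Int) (k : Int) (l : List Int) (l1 : List Int) (h : Pre_dinner n k l l1) :
    dinner n k l l1 = dinner_alt n k l l1 := by
  by_cases hk : ((PySem.Set.ofList l).length : Int) < k
  · simp [dinner, dinner_alt, hk]
  · rcases h.resolve_left hk with ⟨h1, h2, h3⟩ | hl
    swap
    · -- n ≤ -len(l): empty loop on A's side, empty slice on B's; both sum to 0
      have hn0 : n ≤ 0 := by omega
      simp only [dinner, dinner_alt]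
      rw [if_neg hk, if_neg hk, PySem.List.pyRange_one_eq_nil hn0, slice_neg_big l n hl]
      simp [PySem.List.slice, PySem.Dict.values, PySem.Dict.empty, PySem.List.sorted,
        finishB]
    simp only [dinner, dinner_alt]
    rw [if_neg hk, if_neg hk]
    by_cases hk0 : k = 0
    · -- k = 0: both sides sum the empty prefix
      subst hk0
      have hsl : ∀ xs : List Int, PySem.List.slice xs none (some 0) = [] := by
        intro xs
        rw [PySem.List.slice_to xs le_rfl]
        simp
      rw [hsl, hsl]
    · have hn : 0 ≤ n := h3.resolve_right hk0
      have hr : PySem.List.pyRange 0 n 1 = PySem.List.pyRange 0 (n.toNat : Int) 1 := by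
        rw [Int.toNat_of_nonneg hn]
      have hs1 : PySem.List.slice l none (some n) = l.take n.toNat := PySem.List.slice_to l hn
      have hs2 : PySem.List.slice l1 none (some n) = l1.take n.toNat := PySem.List.slice_to l1 hn
      rw [hr, hs1, hs2, foldA_eq l l1 n.toNat (by omega) (by omega)]
      set ps := (l.take n.toNat).zip (l1.take n.toNat) with hps
      -- A's dict values
      have hkeys : (ps.foldl stepD PySem.Dict.empty).keys
          = PySem.Set.ofList (ps.map (fun p => p.1)) := by
        rw [keys_foldl_stepD, PySem.Dict.keys_empty, PySem.Set.update_nil_left]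
      have hnd : (ps.foldl stepD PySem.Dict.empty).keys.Nodup := by
        rw [hkeys]
        exact PySem.Set.nodup_ofList _
      have hv : (ps.foldl stepD PySem.Dict.empty).values
          = (PySem.List.dedup (ps.map (fun p => p.1))).map (minGroup ps) := by
        rw [PySem.Dict.values_eq_map_keys _ hnd 0, hkeys, PySem.List.dedup_eq_ofList]
        apply List.map_congr_left
        intro c hc
        exact getD_foldl_stepD ps c (by simpa [PySem.Set.mem_ofList] using hc)
      -- B's scanned run minima
      set sp := PySem.List.sorted ps (fun p => p.1) false with hspdef
      have hsp : sp.Perm ps := PySem.List.sorted_perm ps (fun p => p.1) false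
      have hpw : sp.Pairwise (fun a b => a.1 ≤ b.1) := PySem.List.sorted_pairwise ps (fun p => p.1)
      rw [hv, scan_eq sp hpw]
      -- the two lists of per-key minima are permutations; sorting with the identity key equates them
      have hS : PySem.List.sorted ((odedup (sp.map (fun p => p.1))).map (minGroup sp)) (fun x => x) false
          = PySem.List.sorted ((PySem.List.dedup (ps.map (fun p => p.1))).map (minGroup ps)) (fun x => x) false := by
        apply PySem.List.sorted_eq_sorted_of_perm _ _ (fun x => x) (fun a b hab => hab)
        have hmg : ∀ d ∈ odedup (sp.map (fun p => p.1)), minGroup sp d = minGroup ps d :=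
          fun d _ => minGroup_perm sp ps hsp d
        rw [List.map_congr_left hmg, PySem.List.dedup_eq_ofList]
        apply List.Perm.map
        apply (List.perm_ext_iff_of_nodup (nodup_odedup _) (PySem.Set.nodup_ofList _)).mpr
        intro a
        rw [mem_odedup, PySem.Set.mem_ofList]
        exact (hsp.map (fun p => p.1)).mem_iff
      rw [hS]

-- ===== VERDICT (by name: the statement is the Claim_ definition above) =====
theorem dinner_spec : Claim_equal_dinner := by
  intro n k l l1 _ hpre
  exact dinner_eq n k l l1 hpre
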